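-- pv_equiv track=rewrite | github.com/Zacharyr41/vcf-pg-loader | src/vcf_pg_loader/validation/sql_functions.py | alleles_match_python
-- ===== SOURCE A (Python) =====
-- def alleles_match_python(ref1: str, alt1: str, ref2: str, alt2: str) -> bool | None:
--     """Python reference implementation of allele matching with strand flip.
--
--     Args:
--         ref1: Reference allele from first source
--         alt1: Alternate allele from first source
--         ref2: Reference allele from second source
--         alt2: Alternate allele from second source
--
--     Returns:
--         True if alleles match (directly or with strand flip), False otherwise,
--         None if any input is None
--     """
--     if any(x is None for x in [ref1, alt1, ref2, alt2]):
--         return None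
--
--     r1, a1 = ref1.upper(), alt1.upper()
--     r2, a2 = ref2.upper(), alt2.upper()
--
--     if (r1 == r2 and a1 == a2) or (r1 == a2 and a1 == r2):
--         return True
--
--     complement = str.maketrans("ACGT", "TGCA")
--     r1_comp = r1.translate(complement)
--     a1_comp = a1.translate(complement)
--
--     if (r1_comp == r2 and a1_comp == a2) or (r1_comp == a2 and a1_comp == r2):
--         return True
--
--     return False
-- ===== SOURCE B (Python) =====
-- def alleles_match_python(ref1, alt1, ref2, alt2):
--     if any(x is None for x in [ref1, alt1, ref2, alt2]):
--         return None
--     comp = str.maketrans("ACGT", "TGCA")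
--
--     def canon(r, a):
--         # minimal representative of the orbit of (r, a) under swap and strand flip
--         r, a = r.upper(), a.upper()
--         rc, ac = r.translate(comp), a.translate(comp)
--         return min((r, a), (a, r), (rc, ac), (ac, rc))
--
--     return canon(ref1, alt1) == canon(ref2, alt2)
-- ===== Notes on version B (the rewrite author's own statement) =====
-- stated objective: alternative
-- what changed: Instead of A's cascade of pairwise comparisons of pair 2 against the four forms of pair 1, B maps each pair to the canonical (minimal) representative of its orbit under swap and strand complement and compares the two canonical forms; correct because swap and complement generate a Klein four-group action, so pairs match iff their orbits (hence minimal representatives) coincide.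
import Mathlib
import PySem

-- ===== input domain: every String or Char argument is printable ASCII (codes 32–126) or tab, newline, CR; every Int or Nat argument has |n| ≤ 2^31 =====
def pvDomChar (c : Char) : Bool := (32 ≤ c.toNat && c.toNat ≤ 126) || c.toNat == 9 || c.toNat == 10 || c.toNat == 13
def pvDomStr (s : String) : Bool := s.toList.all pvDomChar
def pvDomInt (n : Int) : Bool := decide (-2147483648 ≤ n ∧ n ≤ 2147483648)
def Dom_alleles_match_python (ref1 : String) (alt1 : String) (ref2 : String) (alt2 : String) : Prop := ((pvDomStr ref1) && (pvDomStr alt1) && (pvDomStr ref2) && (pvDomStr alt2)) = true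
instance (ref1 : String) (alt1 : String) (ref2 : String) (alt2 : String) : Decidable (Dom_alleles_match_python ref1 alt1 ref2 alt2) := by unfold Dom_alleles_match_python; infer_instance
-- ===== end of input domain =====

-- B replaces A's cascade of pairwise comparisons by canonicalization: each pair is
-- mapped to the minimal representative of its orbit under swap and strand complement,
-- and the two canonical forms are compared (objective: alternative algorithm).
-- ===== PORT A =====
-- str.maketrans("ACGT", "TGCA") followed by .translate: per-character map, other chars unchanged (exact)
def pvComp (c : Char) : Char :=
  if c = 'A' then 'T' else if c = 'C' then 'G' else if c = 'G' then 'C'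
  else if c = 'T' then 'A' else c

def pvTranslate (s : String) : String := String.ofList (s.toList.map pvComp)

def alleles_match_python (ref1 : String) (alt1 : String) (ref2 : String) (alt2 : String) : Option Bool :=
  -- the 'any(x is None …)' guard can never fire: all arguments are Strings here
  let r1 := PySem.Str.upper ref1
  let a1 := PySem.Str.upper alt1
  let r2 := PySem.Str.upper ref2
  let a2 := PySem.Str.upper alt2
  if (r1 = r2 ∧ a1 = a2) ∨ (r1 = a2 ∧ a1 = r2) then some true
  else
    let r1_comp := pvTranslate r1
    let a1_comp := pvTranslate a1
    if (r1_comp = r2 ∧ a1_comp = a2) ∨ (r1_comp = a2 ∧ a1_comp = r2) then some true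
    else some false

-- ===== PORT B =====
-- Python's min over 4 string tuples: left fold of binary min in lexicographic tuple
-- order (first on ties) — exactly Mathlib's min on String ×ₗ String (code-point order).
def pvCanon (r a : String) : String ×ₗ String :=
  let r' := PySem.Str.upper r
  let a' := PySem.Str.upper a
  let rc := pvTranslate r'
  let ac := pvTranslate a'
  min (min (min (toLex (r', a')) (toLex (a', r'))) (toLex (rc, ac))) (toLex (ac, rc))

def alleles_match_python_alt (ref1 : String) (alt1 : String) (ref2 : String) (alt2 : String) : Option Bool :=
  some (decide (pvCanon ref1 alt1 = pvCanon ref2 alt2))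

-- ===== PRECONDITION & SPEC =====
def Spec_alleles_match_python (ref1 : String) (alt1 : String) (ref2 : String) (alt2 : String) (out : Option Bool) : Prop := out = alleles_match_python_alt ref1 alt1 ref2 alt2
instance (ref1 : String) (alt1 : String) (ref2 : String) (alt2 : String) (out : Option Bool) : Decidable (Spec_alleles_match_python ref1 alt1 ref2 alt2 out) := by unfold Spec_alleles_match_python; infer_instance

-- ===== CLAIM (what is proved, stated in full; the proofs are below) =====
def Claim_equal_alleles_match_python : Prop := ∀ (ref1 : String) (alt1 : String) (ref2 : String) (alt2 : String), Dom_alleles_match_python ref1 alt1 ref2 alt2 → Spec_alleles_match_python ref1 alt1 ref2 alt2 (alleles_match_python ref1 alt1 ref2 alt2)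

-- ===== LEMMAS AND PROOFS =====

-- the two generators of the orbit, on lex pairs
def pvSw (p : String ×ₗ String) : String ×ₗ String := toLex ((ofLex p).2, (ofLex p).1)
def pvCp (p : String ×ₗ String) : String ×ₗ String :=
  toLex (pvTranslate (ofLex p).1, pvTranslate (ofLex p).2)

theorem pvComp_invol (c : Char) : pvComp (pvComp c) = c := by
  unfold pvComp; split_ifs with h1 h2 h3 h4 <;> simp_all

theorem pvTranslate_invol (s : String) : pvTranslate (pvTranslate s) = s := by
  unfold pvTranslate
  rw [String.toList_ofList, List.map_map]
  have : pvComp ∘ pvComp = id := funext pvComp_invol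
  rw [this, List.map_id, String.ofList_toList]

theorem pvSw_sw (p : String ×ₗ String) : pvSw (pvSw p) = p := rfl

theorem pvCp_cp (p : String ×ₗ String) : pvCp (pvCp p) = p := by
  unfold pvCp; simp [pvTranslate_invol]

theorem pvSw_cp (p : String ×ₗ String) : pvSw (pvCp p) = pvCp (pvSw p) := rfl

-- the Klein four-group action generated by pvSw and pvCp
def pvApply (bs bc : Bool) (p : String ×ₗ String) : String ×ₗ String :=
  (if bs then pvSw else id) ((if bc then pvCp else id) p)

theorem pvApply_apply (bs bc bs' bc' : Bool) (p : String ×ₗ String) :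
    pvApply bs bc (pvApply bs' bc' p) = pvApply (xor bs bs') (xor bc bc') p := by
  cases bs <;> cases bc <;> cases bs' <;> cases bc' <;>
    simp [pvApply, pvSw_sw, pvCp_cp, pvSw_cp]

-- the orbit of p, in the order A enumerates it
def pvOrbit (p : String ×ₗ String) : List (String ×ₗ String) :=
  [p, pvSw p, pvCp p, pvSw (pvCp p)]

theorem mem_pvOrbit_iff (q p : String ×ₗ String) :
    q ∈ pvOrbit p ↔ ∃ bs bc, q = pvApply bs bc p := by
  constructor
  · intro h
    simp only [pvOrbit, List.mem_cons, List.not_mem_nil, or_false] at h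
    rcases h with rfl | rfl | rfl | rfl
    · exact ⟨false, false, rfl⟩
    · exact ⟨true, false, by simp [pvApply]⟩
    · exact ⟨false, true, by simp [pvApply]⟩
    · exact ⟨true, true, by simp [pvApply]⟩
  · rintro ⟨bs, bc, rfl⟩
    cases bs <;> cases bc <;> simp [pvApply, pvOrbit]

-- the canonical representative: min of the orbit
def pvK (p : String ×ₗ String) : String ×ₗ String :=
  min (min (min p (pvSw p)) (pvCp p)) (pvSw (pvCp p))

theorem pvK_mem (p : String ×ₗ String) : pvK p ∈ pvOrbit p := by
  unfold pvK pvOrbit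
  rcases min_choice (min (min p (pvSw p)) (pvCp p)) (pvSw (pvCp p)) with h | h <;> rw [h]
  · rcases min_choice (min p (pvSw p)) (pvCp p) with h' | h' <;> rw [h']
    · rcases min_choice p (pvSw p) with h'' | h'' <;> rw [h''] <;> simp
    · simp
  · simp

theorem pvK_apply (bs bc : Bool) (p : String ×ₗ String) :
    pvK (pvApply bs bc p) = pvK p := by
  cases bs <;> cases bc <;>
    simp [pvApply, pvK, pvSw_sw, pvCp_cp, pvSw_cp, min_comm, min_left_comm]

theorem pvK_eq_iff (p q : String ×ₗ String) : pvK q = pvK p ↔ q ∈ pvOrbit p := by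
  constructor
  · intro h
    rcases (mem_pvOrbit_iff (pvK q) q).1 (pvK_mem q) with ⟨bs, bc, hq⟩
    rcases (mem_pvOrbit_iff (pvK p) p).1 (pvK_mem p) with ⟨bs', bc', hp⟩
    have hqK : q = pvApply bs bc (pvK q) := by
      rw [hq, pvApply_apply]; cases bs <;> cases bc <;> simp [pvApply]
    rw [mem_pvOrbit_iff]
    refine ⟨xor bs bs', xor bc bc', ?_⟩
    rw [hqK, h, hp, pvApply_apply]
  · intro h
    rcases (mem_pvOrbit_iff q p).1 h with ⟨bs, bc, rfl⟩
    exact pvK_apply bs bc p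

theorem pvCanon_eq_K (r a : String) :
    pvCanon r a = pvK (toLex (PySem.Str.upper r, PySem.Str.upper a)) := rfl

-- A's comparison cascade decides membership of pair 2 in the orbit of pair 1
theorem cascade_eq_orbit (r1 a1 r2 a2 : String) :
    (if (r1 = r2 ∧ a1 = a2) ∨ (r1 = a2 ∧ a1 = r2) then (some true : Option Bool)
     else if (pvTranslate r1 = r2 ∧ pvTranslate a1 = a2) ∨
             (pvTranslate r1 = a2 ∧ pvTranslate a1 = r2) then some true else some false)
    = some (decide (toLex (r2, a2) ∈ pvOrbit (toLex (r1, a1)))) := by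
  have hm : (toLex (r2, a2) ∈ pvOrbit (toLex (r1, a1))) ↔
      ((r2 = r1 ∧ a2 = a1) ∨ (r2 = a1 ∧ a2 = r1) ∨
       (r2 = pvTranslate r1 ∧ a2 = pvTranslate a1) ∨
       (r2 = pvTranslate a1 ∧ a2 = pvTranslate r1)) := by
    simp [pvOrbit, pvSw, pvCp, Prod.ext_iff]
  split_ifs with h1 h2 <;> simp only [Option.some.injEq]
  · symm; rw [decide_eq_true_iff, hm]
    rcases h1 with ⟨h, h'⟩ | ⟨h, h'⟩
    · exact Or.inl ⟨h.symm, h'.symm⟩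
    · exact Or.inr (Or.inl ⟨h'.symm, h.symm⟩)
  · symm; rw [decide_eq_true_iff, hm]
    rcases h2 with ⟨h, h'⟩ | ⟨h, h'⟩
    · exact Or.inr (Or.inr (Or.inl ⟨h.symm, h'.symm⟩))
    · exact Or.inr (Or.inr (Or.inr ⟨h'.symm, h.symm⟩))
  · symm; rw [decide_eq_false_iff_not, hm]
    rintro (⟨h, h'⟩ | ⟨h, h'⟩ | ⟨h, h'⟩ | ⟨h, h'⟩)
    · exact h1 (Or.inl ⟨h.symm, h'.symm⟩)
    · exact h1 (Or.inr ⟨h'.symm, h.symm⟩)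
    · exact h2 (Or.inl ⟨h.symm, h'.symm⟩)
    · exact h2 (Or.inr ⟨h'.symm, h.symm⟩)

theorem a_eq_orbit (ref1 alt1 ref2 alt2 : String) :
    alleles_match_python ref1 alt1 ref2 alt2 =
      some (decide (toLex (PySem.Str.upper ref2, PySem.Str.upper alt2) ∈
        pvOrbit (toLex (PySem.Str.upper ref1, PySem.Str.upper alt1)))) :=
  cascade_eq_orbit (PySem.Str.upper ref1) (PySem.Str.upper alt1)
    (PySem.Str.upper ref2) (PySem.Str.upper alt2)

-- ===== VERDICT (by name: the statement is the Claim_ definition above) =====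
theorem alleles_match_python_spec : Claim_equal_alleles_match_python := by
  intro ref1 alt1 ref2 alt2 _
  unfold Spec_alleles_match_python alleles_match_python_alt
  rw [a_eq_orbit, pvCanon_eq_K, pvCanon_eq_K]
  congr 1
  rw [Bool.eq_iff_iff, decide_eq_true_iff, decide_eq_true_iff, eq_comm]
  exact (pvK_eq_iff _ _).symm
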